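-- pv_equiv track=rewrite | github.com/alexhagiopol/cracking-the-coding-interview | python_solutions/chapter_05_bit_manipulation/problem_05_08_draw_line.py | single_byte_line
-- ===== SOURCE A (Python) =====
-- def single_byte_line(x1, x2):
--     num_1s = x2 - x1 + 1
--     byte = 1
--     while num_1s > 1:
--         byte <<= 1
--         byte += 1
--         num_1s -= 1
--     left_shift = 8 - x2 - 1
--     byte <<= left_shift
--     return byte
-- ===== SOURCE B (Python) =====
-- def single_byte_line(x1, x2):
--     num_1s = max(x2 - x1 + 1, 1)
--     return ((1 << num_1s) - 1) << (7 - x2)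
-- ===== Notes on version B (the rewrite author's own statement) =====
-- stated objective: simpler
-- what changed: Replaces the bit-by-bit while loop with a closed-form mask ((1 << num_1s) - 1) << (7 - x2), with num_1s clamped to at least 1 exactly as A's loop leaves byte == 1 when it never runs.
import Mathlib
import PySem

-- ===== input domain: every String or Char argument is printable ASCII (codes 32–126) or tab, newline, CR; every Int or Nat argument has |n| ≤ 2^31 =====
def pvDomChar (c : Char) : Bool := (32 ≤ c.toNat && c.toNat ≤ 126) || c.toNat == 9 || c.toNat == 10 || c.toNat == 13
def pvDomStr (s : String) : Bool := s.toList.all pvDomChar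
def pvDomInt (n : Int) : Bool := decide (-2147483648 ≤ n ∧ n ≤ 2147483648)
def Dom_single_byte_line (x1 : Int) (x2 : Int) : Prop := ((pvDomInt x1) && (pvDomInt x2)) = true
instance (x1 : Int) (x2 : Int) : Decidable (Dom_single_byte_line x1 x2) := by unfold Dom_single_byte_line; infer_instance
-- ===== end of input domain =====

-- B replaces A's bit-by-bit while loop by one closed-form mask (simpler).

-- ===== PORT A =====
-- the while loop: state (byte, num_1s); the Nat counter is num_1s.toNat, so the loop body
-- runs exactly while num_1s > 1 (toNat ≥ 2), as in Python
def sblGo : Int → Nat → Int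
  | byte, 0 => byte
  | byte, 1 => byte
  | byte, (n+2) => sblGo (byte*2 + 1) (n+1)

def single_byte_line (x1 : Int) (x2 : Int) : Int :=
  let num_1s := x2 - x1 + 1
  let byte := sblGo 1 num_1s.toNat
  let left_shift := 8 - x2 - 1
  byte * 2 ^ left_shift.toNat        -- byte <<= left_shift (left_shift ≥ 0 under Pre_)

-- ===== PORT B =====
def single_byte_line_alt (x1 : Int) (x2 : Int) : Int :=
  let num_1s := max (x2 - x1 + 1) 1
  (2 ^ num_1s.toNat - 1) * 2 ^ (7 - x2).toNat   -- ((1 << num_1s) - 1) << (7 - x2)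

-- ===== PRECONDITION & SPEC =====
-- Pre_ excludes x2 > 7, where Python's `byte <<= 8 - x2 - 1` raises ValueError (negative shift)
-- in A (and B raises the same way on its `<< (7 - x2)`).
def Pre_single_byte_line (x1 : Int) (x2 : Int) : Prop := x2 ≤ 7
instance (x1 : Int) (x2 : Int) : Decidable (Pre_single_byte_line x1 x2) := by unfold Pre_single_byte_line; infer_instance
def pvWitness_single_byte_line : Int × Int := (2, 5)

def Spec_single_byte_line (x1 : Int) (x2 : Int) (out : Int) : Prop := out = single_byte_line_alt x1 x2
instance (x1 : Int) (x2 : Int) (out : Int) : Decidable (Spec_single_byte_line x1 x2 out) := by unfold Spec_single_byte_line; infer_instance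

-- ===== CLAIM (what is proved, stated in full; the proofs are below) =====
def Claim_equal_single_byte_line : Prop := ∀ (x1 : Int) (x2 : Int), Dom_single_byte_line x1 x2 → Pre_single_byte_line x1 x2 → Spec_single_byte_line x1 x2 (single_byte_line x1 x2)

-- ===== LEMMAS AND PROOFS =====
-- A's loop started at byte = 1 with counter k+1 builds the all-ones value 2^(k+1) - 1
lemma sblGo_closed (k : Nat) (b : Int) : sblGo b (k+1) = (b + 1) * 2 ^ k - 1 := by
  induction k generalizing b with
  | zero => simp [sblGo]
  | succ k ih =>
      rw [sblGo, ih]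
      ring

-- ===== VERDICT (by name: the statement is the Claim_ definition above) =====
theorem single_byte_line_spec : Claim_equal_single_byte_line := by
  intro x1 x2 _ _
  show _ = _
  simp only [single_byte_line, single_byte_line_alt]
  have hsh : (8 - x2 - 1).toNat = (7 - x2).toNat := by omega
  rw [hsh]
  by_cases h : x1 ≤ x2
  · -- loop runs: num_1s ≥ 1, counter is k+1
    obtain ⟨k, hk⟩ : ∃ k : Nat, (x2 - x1 + 1).toNat = k + 1 := ⟨(x2 - x1).toNat, by omega⟩
    have hmax : (max (x2 - x1 + 1) 1).toNat = k + 1 := by omega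
    rw [hk, hmax, sblGo_closed, pow_succ]
    ring
  · -- empty range: loop body never runs, byte stays 1, and the clamped mask is 2^1 - 1 = 1
    have h0 : (x2 - x1 + 1).toNat = 0 := by omega
    have hmax : (max (x2 - x1 + 1) 1).toNat = 1 := by omega
    rw [h0, hmax]
    simp [sblGo]
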